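-- pv_equiv track=rewrite | github.com/TimSeah/hackathonerds | local_test_matcher.py | generate_seeker_vent
-- ===== SOURCE A (Python) =====
-- def generate_seeker_vent(themes):
--     """Generate realistic seeker vent text for embedding"""
--     vents = []
--     for theme in themes:
--         theme_name = theme["name"]
--         if "Exam" in theme_name:
--             vents.append("I'm so stressed about my exams, can't sleep, feel like I'm failing")
--         elif "Family" in theme_name:
--             vents.append("My family doesn't understand me, constant arguments at home")
--         elif "Loneliness" in theme_name:
--             vents.append("I feel so alone, like no one really gets what I'm going through")
--         elif "Burnout" in theme_name:
--             vents.append("I'm exhausted all the time, can't keep up, everything feels too much")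
--         elif "Friendship" in theme_name:
--             vents.append("My friends don't seem to care, feeling left out and isolated")
--         elif "Direction" in theme_name:
--             vents.append("I don't know what I'm doing with my life, feel lost and directionless")
--         elif "Confidence" in theme_name:
--             vents.append("I feel like such a failure, everyone else has it together but me")
--
--     return ". ".join(vents) if vents else "I'm struggling and need someone to talk to"
-- ===== SOURCE B (Python) =====
-- _VENTS = [
--     ("Exam", "I'm so stressed about my exams, can't sleep, feel like I'm failing"),
--     ("Family", "My family doesn't understand me, constant arguments at home"),
--     ("Loneliness", "I feel so alone, like no one really gets what I'm going through"),
--     ("Burnout", "I'm exhausted all the time, can't keep up, everything feels too much"),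
--     ("Friendship", "My friends don't seem to care, feeling left out and isolated"),
--     ("Direction", "I don't know what I'm doing with my life, feel lost and directionless"),
--     ("Confidence", "I feel like such a failure, everyone else has it together but me"),
-- ]
--
-- def _vent_of(name):
--     for keyword, vent in _VENTS:
--         if keyword in name:
--             return vent
--     return None
--
-- def generate_seeker_vent(themes):
--     # Build the result string directly, back-to-front: no intermediate list, no join.
--     acc = None
--     for theme in reversed(themes):
--         v = _vent_of(theme["name"])
--         if v is not None:
--             acc = v if acc is None else v + ". " + acc
--     return acc if acc is not None else "I'm struggling and need someone to talk to"
-- ===== Notes on version B (the rewrite author's own statement) =====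
-- stated objective: alternative
-- what changed: Instead of appending matched vents to a list forwards and joining at the end, B traverses the themes back-to-front with an Option accumulator, mapping each name through an ordered keyword table and prepending 'vent + ". "' directly, so the final string is built incrementally with no intermediate list and no join.
import Mathlib
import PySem

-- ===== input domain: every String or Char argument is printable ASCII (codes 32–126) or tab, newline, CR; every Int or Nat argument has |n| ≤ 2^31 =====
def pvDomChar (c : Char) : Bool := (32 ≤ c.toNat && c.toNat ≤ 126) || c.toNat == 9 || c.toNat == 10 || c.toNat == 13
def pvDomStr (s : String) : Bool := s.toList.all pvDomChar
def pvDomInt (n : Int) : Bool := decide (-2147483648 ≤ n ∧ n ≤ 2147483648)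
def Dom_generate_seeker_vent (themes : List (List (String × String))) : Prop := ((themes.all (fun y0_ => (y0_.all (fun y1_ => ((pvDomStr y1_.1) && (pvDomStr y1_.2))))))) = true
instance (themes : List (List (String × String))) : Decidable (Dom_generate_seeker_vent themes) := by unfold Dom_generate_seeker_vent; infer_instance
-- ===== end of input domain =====

-- B builds the joined string directly, traversing the themes back-to-front with an Option accumulator and an ordered keyword table (no intermediate list, no join); alternative decomposition, same cost.


-- theme["name"]: first-match association-list lookup (Python dict access)
def nameOf (theme : List (String × String)) : Option String :=
  (theme.find? (fun p => p.1 == "name")).map Prod.snd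

-- ===== PORT A =====
def generate_seeker_vent (themes : List (List (String × String))) : String :=
  let vents := themes.foldl (fun vents theme =>
    let theme_name := (nameOf theme).getD ""
    if PySem.Str.isIn "Exam" theme_name then
      vents ++ ["I'm so stressed about my exams, can't sleep, feel like I'm failing"]
    else if PySem.Str.isIn "Family" theme_name then
      vents ++ ["My family doesn't understand me, constant arguments at home"]
    else if PySem.Str.isIn "Loneliness" theme_name then
      vents ++ ["I feel so alone, like no one really gets what I'm going through"]
    else if PySem.Str.isIn "Burnout" theme_name then
      vents ++ ["I'm exhausted all the time, can't keep up, everything feels too much"]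
    else if PySem.Str.isIn "Friendship" theme_name then
      vents ++ ["My friends don't seem to care, feeling left out and isolated"]
    else if PySem.Str.isIn "Direction" theme_name then
      vents ++ ["I don't know what I'm doing with my life, feel lost and directionless"]
    else if PySem.Str.isIn "Confidence" theme_name then
      vents ++ ["I feel like such a failure, everyone else has it together but me"]
    else vents) []
  if vents.isEmpty then "I'm struggling and need someone to talk to"
  else PySem.Str.join ". " vents

-- ===== PORT B =====
def ventTable : List (String × String) :=
  [("Exam", "I'm so stressed about my exams, can't sleep, feel like I'm failing"),
   ("Family", "My family doesn't understand me, constant arguments at home"),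
   ("Loneliness", "I feel so alone, like no one really gets what I'm going through"),
   ("Burnout", "I'm exhausted all the time, can't keep up, everything feels too much"),
   ("Friendship", "My friends don't seem to care, feeling left out and isolated"),
   ("Direction", "I don't know what I'm doing with my life, feel lost and directionless"),
   ("Confidence", "I feel like such a failure, everyone else has it together but me")]

-- _vent_of: first vent whose keyword occurs in name, else None
def ventOf (name : String) : Option String :=
  (ventTable.find? (fun kv => PySem.Str.isIn kv.1 name)).map Prod.snd

def generate_seeker_vent_alt (themes : List (List (String × String))) : String :=
  let acc := themes.reverse.foldl (fun acc theme =>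
    match ventOf ((nameOf theme).getD "") with
    | none => acc
    | some v => some (match acc with
                      | none => v
                      | some r => v ++ ". " ++ r)) (none : Option String)
  acc.getD "I'm struggling and need someone to talk to"

-- ===== PRECONDITION & SPEC =====
-- Pre_ excludes themes lacking a "name" key, on which the Python A raises KeyError.
def Pre_generate_seeker_vent (themes : List (List (String × String))) : Prop :=
  (themes.all (fun theme => theme.any (fun p => p.1 == "name"))) = true
instance (themes : List (List (String × String))) : Decidable (Pre_generate_seeker_vent themes) := by unfold Pre_generate_seeker_vent; infer_instance
def pvWitness_generate_seeker_vent : (List (List (String × String))) :=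
  [[("name", "Exam stress")], [("name", "other")]]
def Spec_generate_seeker_vent (themes : List (List (String × String))) (out : String) : Prop := out = generate_seeker_vent_alt themes
instance (themes : List (List (String × String))) (out : String) : Decidable (Spec_generate_seeker_vent themes out) := by unfold Spec_generate_seeker_vent; infer_instance

-- ===== CLAIM (what is proved, stated in full; the proofs are below) =====
def Claim_equal_generate_seeker_vent : Prop := ∀ (themes : List (List (String × String))), Dom_generate_seeker_vent themes → Pre_generate_seeker_vent themes → Spec_generate_seeker_vent themes (generate_seeker_vent themes)

-- ===== LEMMAS AND PROOFS =====

-- the per-theme matched vent, shared characterisation of both sides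
def gVent (theme : List (String × String)) : Option String :=
  ventOf ((nameOf theme).getD "")

-- A's per-theme if/elif chain appends exactly the table's first match
lemma stepA_eq (vents : List String) (theme : List (String × String)) :
    (let theme_name := (nameOf theme).getD ""
     if PySem.Str.isIn "Exam" theme_name then
       vents ++ ["I'm so stressed about my exams, can't sleep, feel like I'm failing"]
     else if PySem.Str.isIn "Family" theme_name then
       vents ++ ["My family doesn't understand me, constant arguments at home"]
     else if PySem.Str.isIn "Loneliness" theme_name then
       vents ++ ["I feel so alone, like no one really gets what I'm going through"]
     else if PySem.Str.isIn "Burnout" theme_name then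
       vents ++ ["I'm exhausted all the time, can't keep up, everything feels too much"]
     else if PySem.Str.isIn "Friendship" theme_name then
       vents ++ ["My friends don't seem to care, feeling left out and isolated"]
     else if PySem.Str.isIn "Direction" theme_name then
       vents ++ ["I don't know what I'm doing with my life, feel lost and directionless"]
     else if PySem.Str.isIn "Confidence" theme_name then
       vents ++ ["I feel like such a failure, everyone else has it together but me"]
     else vents) = vents ++ (gVent theme).toList := by
  set name := (nameOf theme).getD "" with hn
  simp only [gVent, ventOf, ventTable, List.find?, hn]
  cases h1 : PySem.Str.isIn "Exam" name <;>
  cases h2 : PySem.Str.isIn "Family" name <;>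
  cases h3 : PySem.Str.isIn "Loneliness" name <;>
  cases h4 : PySem.Str.isIn "Burnout" name <;>
  cases h5 : PySem.Str.isIn "Friendship" name <;>
  cases h6 : PySem.Str.isIn "Direction" name <;>
  cases h7 : PySem.Str.isIn "Confidence" name <;>
  simp_all

-- A's loop collects the matched vents in order
lemma foldA_eq (l : List (List (String × String))) (acc : List String) :
    l.foldl (fun vents theme => vents ++ (gVent theme).toList) acc
      = acc ++ l.filterMap gVent := by
  induction l generalizing acc with
  | nil => simp
  | cons t rest ih =>
    simp only [List.foldl_cons, List.filterMap_cons, ih]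
    cases h : gVent t <;> simp [h]

-- the value B's Option accumulator holds after processing a suffix
def J : List String → Option String
  | [] => none
  | v :: vs => some (match J vs with
                     | none => v
                     | some r => v ++ ". " ++ r)

-- B's backwards loop computes J of the matched vents
lemma foldB_eq (l : List (List (String × String))) :
    l.reverse.foldl (fun acc theme =>
      match gVent theme with
      | none => acc
      | some v => some (match acc with
                        | none => v
                        | some r => v ++ ". " ++ r)) (none : Option String)
      = J (l.filterMap gVent) := by
  rw [List.foldl_reverse]
  induction l with
  | nil => rfl
  | cons t rest ih =>
    simp only [List.foldr_cons, List.filterMap_cons, ih]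
    cases h : gVent t <;> simp [h, J]

lemma join_cons (a b : String) (rest : List String) :
    PySem.Str.join ". " (a :: b :: rest) = a ++ ". " ++ PySem.Str.join ". " (b :: rest) := by
  simp only [PySem.Str.join, List.map_cons, PySem.Chars.join_cons_cons]
  rw [String.ofList_append, String.ofList_append, String.ofList_toList, String.ofList_toList]

-- A's join of a nonempty list equals B's accumulated string
lemma join_eq_J (v : String) (vs : List String) :
    PySem.Str.join ". " (v :: vs) = (match J vs with
                                     | none => v
                                     | some r => v ++ ". " ++ r) := by
  induction vs generalizing v with
  | nil => simp [PySem.Str.join, PySem.Chars.join_singleton, J]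
  | cons w rs ih =>
    rw [join_cons, ih w]
    cases h : J rs <;> simp [J, h]

-- ===== VERDICT (by name: the statement is the Claim_ definition above) =====
theorem generate_seeker_vent_spec : Claim_equal_generate_seeker_vent := by
  intro themes _ _
  unfold Spec_generate_seeker_vent generate_seeker_vent generate_seeker_vent_alt
  have hA : (fun (vents : List String) (theme : List (String × String)) =>
      let theme_name := (nameOf theme).getD ""
      if PySem.Str.isIn "Exam" theme_name then
        vents ++ ["I'm so stressed about my exams, can't sleep, feel like I'm failing"]
      else if PySem.Str.isIn "Family" theme_name then
        vents ++ ["My family doesn't understand me, constant arguments at home"]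
      else if PySem.Str.isIn "Loneliness" theme_name then
        vents ++ ["I feel so alone, like no one really gets what I'm going through"]
      else if PySem.Str.isIn "Burnout" theme_name then
        vents ++ ["I'm exhausted all the time, can't keep up, everything feels too much"]
      else if PySem.Str.isIn "Friendship" theme_name then
        vents ++ ["My friends don't seem to care, feeling left out and isolated"]
      else if PySem.Str.isIn "Direction" theme_name then
        vents ++ ["I don't know what I'm doing with my life, feel lost and directionless"]
      else if PySem.Str.isIn "Confidence" theme_name then
        vents ++ ["I feel like such a failure, everyone else has it together but me"]
      else vents) =
      (fun (vents : List String) (theme : List (String × String)) =>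
        vents ++ (gVent theme).toList) := by
    funext vents theme
    exact stepA_eq vents theme
  have hB : (fun (acc : Option String) (theme : List (String × String)) =>
      match ventOf ((nameOf theme).getD "") with
      | none => acc
      | some v => some (match acc with
                        | none => v
                        | some r => v ++ ". " ++ r)) =
      (fun (acc : Option String) (theme : List (String × String)) =>
      match gVent theme with
      | none => acc
      | some v => some (match acc with
                        | none => v
                        | some r => v ++ ". " ++ r)) := rfl
  rw [hA, hB, foldA_eq, foldB_eq]
  cases h : themes.filterMap gVent with
  | nil => simp [J]
  | cons v vs =>
    simp only [List.nil_append, List.isEmpty_cons, Bool.false_eq_true, if_false]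
    rw [join_eq_J]
    cases hJ : J vs <;> simp [J, hJ, Option.getD]
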